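-- pv_equiv track=rewrite | github.com/sthuthii/First-week | problem7.py | closest_pivot_number
-- ===== SOURCE A (Python) =====
-- def closest_pivot_number(n):
--     total_sum = n * (n+1)//2
--     left_sum =0
--     right_sum = total_sum
--     pivot = 1
--     min_diff = float('inf')
--
--
--     for i in range(1,n):
--         left_sum += i
--         right_sum -= i
--         diff = abs(left_sum - right_sum)
--
--         if diff < min_diff:
--             min_diff = diff
--             pivot = i+1
--
--     return pivot
-- ===== SOURCE B (Python) =====
-- def closest_pivot_number(n):
--     # Binary search for the largest i in [1, n-1] with i*(i+1) <= total (prefix sums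
--     # are monotone), then compare with the next candidate; O(log n) instead of O(n).
--     if n < 2:
--         return 1
--     total = n * (n + 1) // 2
--     lo, hi = 1, n - 1
--     while lo < hi:
--         mid = (lo + hi + 1) // 2
--         if mid * (mid + 1) <= total:
--             lo = mid
--         else:
--             hi = mid - 1
--     i = lo
--     if i + 1 <= n - 1 and (i + 1) * (i + 2) - total < total - i * (i + 1):
--         i = i + 1
--     return i + 1
-- ===== Notes on version B (the rewrite author's own statement) =====
-- stated objective: faster
-- what changed: Replaces the linear scan of all split points by a binary search for the crossing point where the left prefix sum overtakes half the total (the difference is unimodal), then compares the one adjacent candidate with A's smallest-pivot tie-break.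
import Mathlib
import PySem

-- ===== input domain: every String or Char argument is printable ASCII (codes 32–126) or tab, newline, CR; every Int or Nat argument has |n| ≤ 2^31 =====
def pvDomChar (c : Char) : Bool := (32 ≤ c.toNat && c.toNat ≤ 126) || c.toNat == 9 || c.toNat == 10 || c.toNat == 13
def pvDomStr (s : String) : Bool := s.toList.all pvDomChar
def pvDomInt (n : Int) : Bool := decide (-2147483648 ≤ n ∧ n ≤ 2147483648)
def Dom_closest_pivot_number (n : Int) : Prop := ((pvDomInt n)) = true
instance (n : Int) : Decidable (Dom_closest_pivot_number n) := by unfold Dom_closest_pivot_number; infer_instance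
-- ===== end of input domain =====

-- B replaces A's linear scan over all split points by a binary search for the
-- crossing point of the monotone prefix sums; return values agree everywhere.

-- ===== PORT A =====
-- loop body of A; min_diff = float('inf') is modelled as `none` (compares greater than every int)
def pvStepA (st : Int × Int × Int × Option Int) (i : Int) : Int × Int × Int × Option Int :=
  match st.2.2.2 with
  | none => (st.1 + i, st.2.1 - i, i + 1, some |st.1 + i - (st.2.1 - i)|)
  | some m =>
      if |st.1 + i - (st.2.1 - i)| < m
      then (st.1 + i, st.2.1 - i, i + 1, some |st.1 + i - (st.2.1 - i)|)
      else (st.1 + i, st.2.1 - i, st.2.2.1, some m)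

def closest_pivot_number (n : Int) : Int :=
  let total_sum := PySem.Int.floordiv (n * (n + 1)) 2
  let st := (PySem.List.pyRange 1 n 1).foldl pvStepA (0, total_sum, 1, none)
  st.2.2.1

-- ===== PORT B =====
-- the while-loop of Source B: largest i in [lo, hi] with i*(i+1) ≤ total
def pvBsearch (total lo hi : Int) : Int :=
  if h : lo < hi then
    let mid := PySem.Int.floordiv (lo + hi + 1) 2
    if mid * (mid + 1) ≤ total then pvBsearch total mid hi
    else pvBsearch total lo (mid - 1)
  else lo
termination_by (hi - lo).toNat
decreasing_by
  · have hm : PySem.Int.floordiv (lo + hi + 1) 2 = (lo + hi + 1) / 2 :=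
      PySem.Int.floordiv_eq_ediv_of_pos (by omega)
    simp only [hm]; omega
  · have hm : PySem.Int.floordiv (lo + hi + 1) 2 = (lo + hi + 1) / 2 :=
      PySem.Int.floordiv_eq_ediv_of_pos (by omega)
    simp only [hm]; omega

def closest_pivot_number_alt (n : Int) : Int :=
  if n < 2 then 1
  else
    let total := PySem.Int.floordiv (n * (n + 1)) 2
    let i := pvBsearch total 1 (n - 1)
    let i := if i + 1 ≤ n - 1 ∧ (i + 1) * (i + 2) - total < total - i * (i + 1) then i + 1 else i
    i + 1

-- ===== PRECONDITION & SPEC =====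
def Spec_closest_pivot_number (n : Int) (out : Int) : Prop := out = closest_pivot_number_alt n
instance (n : Int) (out : Int) : Decidable (Spec_closest_pivot_number n out) := by unfold Spec_closest_pivot_number; infer_instance

-- ===== CLAIM (what is proved, stated in full; the proofs are below) =====
def Claim_equal_closest_pivot_number : Prop := ∀ (n : Int), Dom_closest_pivot_number n → Spec_closest_pivot_number n (closest_pivot_number n)

-- ===== LEMMAS AND PROOFS =====
-- g i = i*(i+1) = twice the left prefix sum after i loop iterations of A
def pvG (i : Int) : Int := i * (i + 1)

lemma pvG_mono {a b : Int} (h0 : 0 ≤ a) (h : a ≤ b) : pvG a ≤ pvG b := by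
  unfold pvG; nlinarith

lemma pvG_strict {a b : Int} (h0 : 0 ≤ a) (h : a < b) : pvG a < pvG b := by
  unfold pvG; nlinarith

-- one step of A's loop, on a reachable state
lemma pvStepA_some (L T p d i : Int) :
    pvStepA (L, T - L, p, some d) i =
      if |2 * L + 2 * i - T| < d
      then (L + i, T - L - i, i + 1, some |2 * L + 2 * i - T|)
      else (L + i, T - L - i, p, some d) := by
  have h : L + i - (T - L - i) = 2 * L + 2 * i - T := by ring
  simp only [pvStepA, h]

lemma pvBsearch_unfold_pos (total lo hi : Int) (hlt : lo < hi) :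
    pvBsearch total lo hi =
      (if (PySem.Int.floordiv (lo + hi + 1) 2) * ((PySem.Int.floordiv (lo + hi + 1) 2) + 1) ≤ total
       then pvBsearch total (PySem.Int.floordiv (lo + hi + 1) 2) hi
       else pvBsearch total lo ((PySem.Int.floordiv (lo + hi + 1) 2) - 1)) := by
  rw [pvBsearch]; simp only [dif_pos hlt]

lemma pvBsearch_unfold_neg (total lo hi : Int) (hlt : ¬ lo < hi) : pvBsearch total lo hi = lo := by
  rw [pvBsearch]; simp only [dif_neg hlt]

-- the binary search returns the largest i in [lo, hi] with pvG i ≤ total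
lemma pvBsearch_correct_aux : ∀ (N : Nat) (total lo hi : Int), (hi - lo).toNat ≤ N →
    1 ≤ lo → lo ≤ hi → pvG lo ≤ total →
    lo ≤ pvBsearch total lo hi ∧ pvBsearch total lo hi ≤ hi ∧
    pvG (pvBsearch total lo hi) ≤ total ∧
    (∀ j, pvBsearch total lo hi < j → j ≤ hi → total < pvG j) := by
  intro N
  induction N with
  | zero =>
    intro total lo hi hN h0 h1 h2
    have hlt : ¬ lo < hi := by omega
    rw [pvBsearch_unfold_neg total lo hi hlt]
    exact ⟨le_refl _, h1, h2, fun j hj1 hj2 => by omega⟩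
  | succ N ih =>
    intro total lo hi hN h0 h1 h2
    by_cases hlt : lo < hi
    · rw [pvBsearch_unfold_pos total lo hi hlt]
      set M := PySem.Int.floordiv (lo + hi + 1) 2 with hMdef
      have hMval : M = (lo + hi + 1) / 2 := PySem.Int.floordiv_eq_ediv_of_pos (by omega)
      have hb1 : lo < M := by omega
      have hb2 : M ≤ hi := by omega
      by_cases hle : M * (M + 1) ≤ total
      · rw [if_pos hle]
        obtain ⟨r1, r2, r3, r4⟩ := ih total M hi (by omega) (by omega) hb2 (by simpa [pvG] using hle)
        exact ⟨by omega, r2, r3, r4⟩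
      · rw [if_neg hle]
        obtain ⟨r1, r2, r3, r4⟩ := ih total lo (M - 1) (by omega) h0 (by omega) h2
        refine ⟨r1, by omega, r3, fun j hj1 hj2 => ?_⟩
        by_cases hj3 : j ≤ M - 1
        · exact r4 j hj1 hj3
        · have hmono := pvG_mono (show (0:Int) ≤ M by omega) (show M ≤ j by omega)
          have hlt2 : total < pvG M := by unfold pvG; omega
          exact lt_of_lt_of_le hlt2 hmono
    · rw [pvBsearch_unfold_neg total lo hi hlt]
      exact ⟨le_refl _, h1, h2, fun j hj1 hj2 => by omega⟩

lemma pvBsearch_correct (total lo hi : Int) (h0 : 1 ≤ lo) (h1 : lo ≤ hi) (h2 : pvG lo ≤ total) :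
    lo ≤ pvBsearch total lo hi ∧ pvBsearch total lo hi ≤ hi ∧
    pvG (pvBsearch total lo hi) ≤ total ∧
    (∀ j, pvBsearch total lo hi < j → j ≤ hi → total < pvG j) :=
  pvBsearch_correct_aux (hi - lo).toNat total lo hi (le_refl _) h0 h1 h2

-- A's fold on [1..m] while the diff is still shrinking (m ≤ k, the crossing point)
lemma pvFoldA_le (T k : Int) (hk1 : 1 ≤ k) (hk2 : pvG k ≤ T) :
    ∀ m : Int, 1 ≤ m → m ≤ k →
    ∃ L, 2 * L = pvG m ∧
      (PySem.List.pyRange 1 (m + 1) 1).foldl pvStepA (0, T, 1, none)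
        = (L, T - L, m + 1, some (T - pvG m)) := by
  intro m hm
  induction m, hm using Int.le_induction with
  | base =>
    intro _
    have hT : pvG 1 ≤ T := le_trans (pvG_mono (by omega) hk1) hk2
    have hT' : (2:Int) ≤ T := by simpa [pvG] using hT
    refine ⟨1, by norm_num [pvG], ?_⟩
    rw [PySem.List.pyRange_one_singleton]
    have habs : |(0:Int) + 1 - (T - 1)| = T - 2 := by
      rw [abs_of_nonpos (by omega)]; ring
    simp only [List.foldl_cons, List.foldl_nil, pvStepA, habs]
    simp [pvG]
  | succ m hm ih =>
    intro hmk
    obtain ⟨L, hL, hfold⟩ := ih (by omega)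
    have hgm1 : pvG (m + 1) ≤ T := le_trans (pvG_mono (by omega) hmk) hk2
    have hstep : pvG m + 2 * (m + 1) = pvG (m + 1) := by unfold pvG; ring
    have hlt := pvG_strict (show (0:Int) ≤ m by omega) (show m < m + 1 by omega)
    refine ⟨L + (m + 1), by omega, ?_⟩
    rw [PySem.List.pyRange_one_succ_right (by omega : (1:Int) ≤ m + 1)]
    rw [List.foldl_append, hfold]
    simp only [List.foldl_cons, List.foldl_nil, pvStepA_some]
    have habs : |2 * L + 2 * (m + 1) - T| = T - pvG (m + 1) := by
      rw [abs_of_nonpos (by omega)]; omega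
    rw [habs, if_pos (by omega)]
    have heq : T - L - (m + 1) = T - (L + (m + 1)) := by ring
    rw [heq]

-- A's fold on [1..m] past the crossing point k: pivot and min_diff are frozen
lemma pvFoldA_ge (T k n : Int) (hk1 : 1 ≤ k) (hk2 : pvG k ≤ T)
    (hk4 : ∀ j, k < j → j ≤ n - 1 → T < pvG j) :
    ∀ m : Int, k + 1 ≤ m → m ≤ n - 1 →
    ∃ L, 2 * L = pvG m ∧
      (PySem.List.pyRange 1 (m + 1) 1).foldl pvStepA (0, T, 1, none)
        = (L, T - L,
           (if pvG (k + 1) - T < T - pvG k then k + 2 else k + 1),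
           some (if pvG (k + 1) - T < T - pvG k then pvG (k + 1) - T else T - pvG k)) := by
  intro m hm
  induction m, hm using Int.le_induction with
  | base =>
    intro hbound
    obtain ⟨L, hL, hfold⟩ := pvFoldA_le T k hk1 hk2 k (by omega) (le_refl _)
    have hgk1 : T < pvG (k + 1) := hk4 (k + 1) (by omega) hbound
    have hstep : pvG k + 2 * (k + 1) = pvG (k + 1) := by unfold pvG; ring
    refine ⟨L + (k + 1), by omega, ?_⟩
    rw [PySem.List.pyRange_one_succ_right (by omega : (1:Int) ≤ k + 1)]
    rw [List.foldl_append, hfold]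
    simp only [List.foldl_cons, List.foldl_nil, pvStepA_some]
    have habs : |2 * L + 2 * (k + 1) - T| = pvG (k + 1) - T := by
      rw [abs_of_nonneg (by omega)]; omega
    rw [habs]
    have heq : T - L - (k + 1) = T - (L + (k + 1)) := by ring
    by_cases hc : pvG (k + 1) - T < T - pvG k
    · have h2 : k + 2 = k + 1 + 1 := by ring
      rw [if_pos hc, if_pos hc, if_pos hc, heq, h2]
    · rw [if_neg hc, if_neg hc, if_neg hc, heq]
  | succ m hm ih =>
    intro hbound
    obtain ⟨L, hL, hfold⟩ := ih (by omega)
    have hgm1 : T < pvG (m + 1) := hk4 (m + 1) (by omega) hbound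
    have hgk1m : pvG (k + 1) ≤ pvG (m + 1) := pvG_mono (by omega) (by omega)
    have hstep : pvG m + 2 * (m + 1) = pvG (m + 1) := by unfold pvG; ring
    refine ⟨L + (m + 1), by omega, ?_⟩
    rw [PySem.List.pyRange_one_succ_right (by omega : (1:Int) ≤ m + 1)]
    rw [List.foldl_append, hfold]
    simp only [List.foldl_cons, List.foldl_nil, pvStepA_some]
    have habs : |2 * L + 2 * (m + 1) - T| = pvG (m + 1) - T := by
      rw [abs_of_nonneg (by omega)]; omega
    rw [habs]
    have heq : T - L - (m + 1) = T - (L + (m + 1)) := by ring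
    have hnot : ¬ pvG (m + 1) - T <
        (if pvG (k + 1) - T < T - pvG k then pvG (k + 1) - T else T - pvG k) := by
      by_cases hc : pvG (k + 1) - T < T - pvG k
      · rw [if_pos hc]; omega
      · rw [if_neg hc]; omega
    rw [if_neg hnot, heq]

-- ===== VERDICT (by name: the statement is the Claim_ definition above) =====
theorem closest_pivot_number_spec : Claim_equal_closest_pivot_number := by
  intro n _
  unfold Spec_closest_pivot_number
  simp only [closest_pivot_number, closest_pivot_number_alt]
  by_cases hn : n < 2
  · rw [PySem.List.pyRange_one_eq_nil (by omega), if_pos hn]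
    rfl
  · rw [if_neg hn]
    have hn2 : (2:Int) ≤ n := by omega
    set T := PySem.Int.floordiv (n * (n + 1)) 2 with hTdef
    have hTval : T = n * (n + 1) / 2 := PySem.Int.floordiv_eq_ediv_of_pos (by omega)
    have h6 : (6:Int) ≤ n * (n + 1) := by nlinarith
    have hT2 : (2:Int) ≤ T := by
      set s := n * (n + 1) with hs
      omega
    have hg1 : pvG 1 ≤ T := by simpa [pvG] using hT2
    obtain ⟨r1, r2, r3, r4⟩ := pvBsearch_correct T 1 (n - 1) (by omega) (by omega) hg1
    set k := pvBsearch T 1 (n - 1) with hkdef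
    have hrange : PySem.List.pyRange 1 n 1 = PySem.List.pyRange 1 ((n - 1) + 1) 1 := by
      norm_num
    by_cases hkn : k < n - 1
    · obtain ⟨L, hL, hfold⟩ := pvFoldA_ge T k n r1 r3 r4 (n - 1) (by omega) (le_refl _)
      rw [hrange, hfold]
      have hc : ((k + 1 ≤ n - 1 ∧ (k + 1) * (k + 2) - T < T - k * (k + 1)) ↔
          (pvG (k + 1) - T < T - pvG k)) := by
        unfold pvG
        constructor
        · rintro ⟨_, h⟩; nlinarith
        · intro h; exact ⟨by omega, by nlinarith⟩
      by_cases hd : pvG (k + 1) - T < T - pvG k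
      · rw [if_pos hd, if_pos (hc.mpr hd)]
        show k + 2 = k + 1 + 1
        ring
      · rw [if_neg hd, if_neg (fun h => hd (hc.mp h))]
    · have hke : k = n - 1 := by omega
      obtain ⟨L, hL, hfold⟩ := pvFoldA_le T k r1 r3 (n - 1) (by omega) (by omega)
      rw [hrange, hfold]
      rw [if_neg (fun hcon => absurd hcon.1 (by omega : ¬ k + 1 ≤ n - 1))]
      show n - 1 + 1 = k + 1
      omega
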